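-- pv_equiv track=rewrite | github.com/shouma1210/android2flutter | translator/generator.py | _collect_needed_controllers
-- ===== SOURCE A (Python) =====
-- from typing import Dict, List, Tuple, Set, Optional
--
-- def _collect_needed_controllers(edittexts: List[Dict]) -> List[str]:
--     need_user = False
--     need_pass = False
--     need_confirm = False
--     for et in edittexts:
--         lower = ((et.get("hint") or "") + (et.get("id") or "") + (et.get("inputType") or "")).lower()
--         if "username" in lower or "user" in lower or "mail" in lower:
--             need_user = True
--         if "password" in lower or "textpassword" in lower:
--             if "confirm" in lower:
--                 need_confirm = True
--             else:
--                 need_pass = True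
--     ctrls: List[str] = []
--     if need_user: ctrls.append("_usernameController")
--     if need_pass: ctrls.append("_passwordController")
--     if need_confirm: ctrls.append("_confirmPasswordController")
--     return ctrls
-- ===== SOURCE B (Python) =====
-- from typing import Dict, List
--
-- _CONTROLLERS = ["_usernameController", "_passwordController", "_confirmPasswordController"]
--
-- def _collect_needed_controllers(edittexts: List[Dict]) -> List[str]:
--     # Recursive scan that accumulates the SET of needed controller indices and
--     # short-circuits once all three are known needed; the keyword tests are the
--     # minimal ones ("username" contains "user", "textpassword" contains "password").
--     def go(items, needed):
--         if not items or len(needed) == 3: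
--             return needed
--         et = items[0]
--         s = ((et.get("hint") or "") + (et.get("id") or "") + (et.get("inputType") or "")).lower()
--         add = set()
--         if "user" in s or "mail" in s:
--             add.add(0)
--         if "password" in s:
--             add.add(2 if "confirm" in s else 1)
--         return go(items[1:], needed | add)
--     needed = go(edittexts, set())
--     return [c for i, c in enumerate(_CONTROLLERS) if i in needed]
-- ===== Notes on version B (the rewrite author's own statement) =====
-- stated objective: alternative
-- what changed: Replaces the three-boolean-flag loop by a recursive scan that accumulates a set of needed controller indices, short-circuits as soon as all three are present, uses the minimal keyword tests ('user' subsumes 'username', 'password' subsumes 'textpassword'), and emits the result by filtering a controller table on set membership.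
import Mathlib
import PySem

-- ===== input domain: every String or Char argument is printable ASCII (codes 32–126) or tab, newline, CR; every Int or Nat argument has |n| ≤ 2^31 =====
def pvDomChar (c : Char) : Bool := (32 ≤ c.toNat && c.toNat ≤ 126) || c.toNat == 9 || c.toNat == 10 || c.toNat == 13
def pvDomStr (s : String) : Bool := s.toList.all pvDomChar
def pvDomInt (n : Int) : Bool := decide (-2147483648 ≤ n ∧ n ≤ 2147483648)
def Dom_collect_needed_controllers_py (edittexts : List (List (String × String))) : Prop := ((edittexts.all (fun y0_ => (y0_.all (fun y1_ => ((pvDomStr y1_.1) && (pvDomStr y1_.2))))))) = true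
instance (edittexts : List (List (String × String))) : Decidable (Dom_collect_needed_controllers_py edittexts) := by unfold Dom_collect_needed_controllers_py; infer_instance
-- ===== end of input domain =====

-- B replaces A's three-flag loop by a recursive scan accumulating a set of needed controller
-- indices (short-circuiting once all three are present), with minimal keyword tests, and emits
-- the result by filtering a controller table on set membership (alternative decomposition; same cost).


-- ===== PORT A =====
-- ((et.get("hint") or "") + (et.get("id") or "") + (et.get("inputType") or "")).lower()
-- (a missing key and an empty value both contribute "", so `or ""` is exactly getD "" here);
-- kept as a List Char, substring tests via PySem.Chars.isIn. Shared by both ports: both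
-- Pythons compute this identical expression per edittext.
def pvKey (et : List (String × String)) : List Char :=
  PySem.Chars.lower
    (((PySem.Dict.mk et).getD "hint" "").toList ++
     ((PySem.Dict.mk et).getD "id" "").toList ++
     ((PySem.Dict.mk et).getD "inputType" "").toList)

def collect_needed_controllers_py (edittexts : List (List (String × String))) : List String :=
  let st := edittexts.foldl (fun (st : Bool × Bool × Bool) et =>
    let lower := pvKey et
    let st :=
      if PySem.Chars.isIn "username".toList lower || PySem.Chars.isIn "user".toList lower ||
         PySem.Chars.isIn "mail".toList lower then (true, st.2.1, st.2.2) else st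
    if PySem.Chars.isIn "password".toList lower || PySem.Chars.isIn "textpassword".toList lower then
      (if PySem.Chars.isIn "confirm".toList lower then (st.1, st.2.1, true)
       else (st.1, true, st.2.2))
    else st) (false, false, false)
  let ctrls : List String := []
  let ctrls := if st.1 then ctrls ++ ["_usernameController"] else ctrls
  let ctrls := if st.2.1 then ctrls ++ ["_passwordController"] else ctrls
  let ctrls := if st.2.2 then ctrls ++ ["_confirmPasswordController"] else ctrls
  ctrls

-- ===== PORT B =====
def pvControllers : List String :=
  ["_usernameController", "_passwordController", "_confirmPasswordController"]

-- the `add` set built for one edittext in Source B's go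
def pvContrib (et : List (String × String)) : PySem.Set Int :=
  let s := pvKey et
  let add : PySem.Set Int := PySem.Set.empty
  let add := if PySem.Chars.isIn "user".toList s || PySem.Chars.isIn "mail".toList s then
      PySem.Set.add add 0 else add
  if PySem.Chars.isIn "password".toList s then
    PySem.Set.add add (if PySem.Chars.isIn "confirm".toList s then 2 else 1)
  else add

-- Source B's recursive go(items, needed), early exit when len(needed) == 3
def pvGo : List (List (String × String)) → PySem.Set Int → PySem.Set Int
  | [], needed => needed
  | et :: rest, needed =>
    if PySem.Set.len needed == 3 then needed
    else pvGo rest (PySem.Set.union needed (pvContrib et))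

def collect_needed_controllers_py_alt (edittexts : List (List (String × String))) : List String :=
  let needed := pvGo edittexts PySem.Set.empty
  ((PySem.List.enumerate pvControllers).filter
      (fun ic => PySem.Set.contains needed ic.1)).map (fun ic => ic.2)

-- ===== PRECONDITION & SPEC =====
def Spec_collect_needed_controllers_py (edittexts : List (List (String × String))) (out : List String) : Prop := out = collect_needed_controllers_py_alt edittexts
instance (edittexts : List (List (String × String))) (out : List String) : Decidable (Spec_collect_needed_controllers_py edittexts out) := by unfold Spec_collect_needed_controllers_py; infer_instance

-- ===== CLAIM (what is proved, stated in full; the proofs are below) =====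
def Claim_equal_collect_needed_controllers_py : Prop := ∀ (edittexts : List (List (String × String))), Dom_collect_needed_controllers_py edittexts → Spec_collect_needed_controllers_py edittexts (collect_needed_controllers_py edittexts)

-- ===== LEMMAS AND PROOFS =====

-- per-element tests as A writes them
def pvAU (et : List (String × String)) : Bool :=
  PySem.Chars.isIn "username".toList (pvKey et) || PySem.Chars.isIn "user".toList (pvKey et) ||
  PySem.Chars.isIn "mail".toList (pvKey et)
def pvAP (et : List (String × String)) : Bool :=
  (PySem.Chars.isIn "password".toList (pvKey et) || PySem.Chars.isIn "textpassword".toList (pvKey et)) &&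
  !PySem.Chars.isIn "confirm".toList (pvKey et)
def pvAC (et : List (String × String)) : Bool :=
  (PySem.Chars.isIn "password".toList (pvKey et) || PySem.Chars.isIn "textpassword".toList (pvKey et)) &&
  PySem.Chars.isIn "confirm".toList (pvKey et)

-- "username" in s implies "user" in s
theorem pv_user_sub (s : List Char) (h : PySem.Chars.isIn "username".toList s = true) :
    PySem.Chars.isIn "user".toList s = true := by
  rw [PySem.Chars.isIn_iff_infix] at h ⊢
  exact List.IsInfix.trans (by decide) h

-- "textpassword" in s implies "password" in s
theorem pv_pass_sub (s : List Char) (h : PySem.Chars.isIn "textpassword".toList s = true) :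
    PySem.Chars.isIn "password".toList s = true := by
  rw [PySem.Chars.isIn_iff_infix] at h ⊢
  exact List.IsInfix.trans (by decide) h

theorem pv_aU_eq (et : List (String × String)) :
    pvAU et = (PySem.Chars.isIn "user".toList (pvKey et) || PySem.Chars.isIn "mail".toList (pvKey et)) := by
  unfold pvAU
  cases h : PySem.Chars.isIn "username".toList (pvKey et) with
  | false => simp
  | true => rw [pv_user_sub _ h]; simp

theorem pv_pw_eq (et : List (String × String)) :
    (PySem.Chars.isIn "password".toList (pvKey et) || PySem.Chars.isIn "textpassword".toList (pvKey et))
      = PySem.Chars.isIn "password".toList (pvKey et) := by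
  cases h : PySem.Chars.isIn "textpassword".toList (pvKey et) with
  | false => simp
  | true => rw [pv_pass_sub _ h]; simp

-- membership in one edittext's contribution set
theorem pv_mem_contrib (et : List (String × String)) (k : Int) :
    k ∈ pvContrib et ↔ (k = 0 ∧ pvAU et = true) ∨ (k = 1 ∧ pvAP et = true) ∨ (k = 2 ∧ pvAC et = true) := by
  rw [pv_aU_eq]
  unfold pvAP pvAC
  rw [pv_pw_eq]
  simp only [pvContrib]
  generalize (PySem.Chars.isIn "user".toList (pvKey et) || PySem.Chars.isIn "mail".toList (pvKey et)) = bU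
  generalize PySem.Chars.isIn "password".toList (pvKey et) = bP
  generalize PySem.Chars.isIn "confirm".toList (pvKey et) = bC
  cases bU <;> cases bP <;> cases bC <;>
    simp [PySem.Set.empty]

theorem pv_contrib_range (et : List (String × String)) (k : Int) (h : k ∈ pvContrib et) :
    k ∈ ([0, 1, 2] : List Int) := by
  rcases (pv_mem_contrib et k).1 h with ⟨rfl, _⟩ | ⟨rfl, _⟩ | ⟨rfl, _⟩ <;> simp

-- a nodup subset of {0,1,2} of size 3 contains all of 0,1,2
theorem pv_full (L : List Int) (hn : L.Nodup) (hs : ∀ x ∈ L, x ∈ ([0, 1, 2] : List Int))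
    (hl : L.length = 3) (k : Int) (hk : k ∈ ([0, 1, 2] : List Int)) : k ∈ L := by
  have hsp : List.Subperm L [0, 1, 2] := List.subperm_of_subset hn (fun x hx => hs x hx)
  have hp : List.Perm L [0, 1, 2] := hsp.perm_of_length_le (by simp [hl])
  exact hp.mem_iff.mpr hk

-- Source B's recursion computes, membership-wise, 'needed ∪ union of contributions'
theorem pv_go_mem (l : List (List (String × String))) (needed : PySem.Set Int)
    (hn : needed.Nodup) (hs : ∀ x ∈ needed, x ∈ ([0, 1, 2] : List Int)) (k : Int) :
    k ∈ pvGo l needed ↔ k ∈ needed ∨ ∃ et ∈ l, k ∈ pvContrib et := by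
  induction l generalizing needed with
  | nil => simp [pvGo]
  | cons et rest ih =>
    unfold pvGo
    split_ifs with h
    · have hlen : needed.length = 3 := by
        simp [PySem.Set.len] at h; exact_mod_cast h
      constructor
      · intro hk; exact Or.inl hk
      · rintro (hk | ⟨et', het', hk⟩)
        · exact hk
        · exact pv_full needed hn hs hlen k (pv_contrib_range et' k hk)
    · rw [ih (PySem.Set.union needed (pvContrib et)) (PySem.Set.nodup_union _ _ hn)
        (by intro x hx
            rcases (PySem.Set.mem_union _ _ _).1 hx with hx | hx
            · exact hs x hx
            · exact pv_contrib_range et x hx)]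
      constructor
      · rintro (h' | ⟨et', het', h'⟩)
        · rcases (PySem.Set.mem_union _ _ _).1 h' with h' | h'
          · exact Or.inl h'
          · exact Or.inr ⟨et, by simp, h'⟩
        · exact Or.inr ⟨et', by simp [het'], h'⟩
      · rintro (h' | ⟨et', het', h'⟩)
        · exact Or.inl ((PySem.Set.mem_union _ _ _).2 (Or.inl h'))
        · rcases List.mem_cons.1 het' with rfl | het'
          · exact Or.inl ((PySem.Set.mem_union _ _ _).2 (Or.inr h'))
          · exact Or.inr ⟨et', het', h'⟩

-- A's loop step or-s the three per-element tests onto the flags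
theorem pv_step_eq (st : Bool × Bool × Bool) (et : List (String × String)) :
    (let lower := pvKey et
     let st' :=
       if PySem.Chars.isIn "username".toList lower || PySem.Chars.isIn "user".toList lower ||
          PySem.Chars.isIn "mail".toList lower then (true, st.2.1, st.2.2) else st
     if PySem.Chars.isIn "password".toList lower || PySem.Chars.isIn "textpassword".toList lower then
       (if PySem.Chars.isIn "confirm".toList lower then (st'.1, st'.2.1, true)
        else (st'.1, true, st'.2.2))
     else st') =
    (st.1 || pvAU et, st.2.1 || pvAP et, st.2.2 || pvAC et) := by
  show _ = (_, _, _)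
  simp only [pvAU, pvAP, pvAC]
  obtain ⟨u, p, c⟩ := st
  split_ifs <;> simp_all

-- A's fold equals the flags or-ed with the three any-scans
theorem pv_fold_eq (l : List (List (String × String))) (st : Bool × Bool × Bool) :
    l.foldl (fun (st : Bool × Bool × Bool) et =>
      let lower := pvKey et
      let st :=
        if PySem.Chars.isIn "username".toList lower || PySem.Chars.isIn "user".toList lower ||
           PySem.Chars.isIn "mail".toList lower then (true, st.2.1, st.2.2) else st
      if PySem.Chars.isIn "password".toList lower || PySem.Chars.isIn "textpassword".toList lower then
        (if PySem.Chars.isIn "confirm".toList lower then (st.1, st.2.1, true)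
         else (st.1, true, st.2.2))
      else st) st =
    (st.1 || l.any pvAU, st.2.1 || l.any pvAP, st.2.2 || l.any pvAC) := by
  induction l generalizing st with
  | nil => simp
  | cons et rest ih =>
    rw [List.foldl_cons, pv_step_eq, ih]
    simp [Bool.or_assoc]

-- B's output step: the table filter as a chain of conditional appends
theorem pv_out (S : PySem.Set Int) :
    ((PySem.List.enumerate pvControllers).filter (fun ic => PySem.Set.contains S ic.1)).map
        (fun ic => ic.2) =
      ((if PySem.Set.contains S 0 then ["_usernameController"] else []) ++
       (if PySem.Set.contains S 1 then ["_passwordController"] else []) ++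
       (if PySem.Set.contains S 2 then ["_confirmPasswordController"] else [])) := by
  cases h0 : decide ((0 : Int) ∈ S) <;> cases h1 : decide ((1 : Int) ∈ S) <;>
    cases h2 : decide ((2 : Int) ∈ S) <;>
    simp [pvControllers, PySem.List.enumerate, List.filter, h0, h1, h2]

-- B's final set decides each of A's flags
theorem pv_needed_test (l : List (List (String × String))) (k : Int)
    (t : List (String × String) → Bool)
    (hk : ∀ et, k ∈ pvContrib et ↔ t et = true) :
    PySem.Set.contains (pvGo l PySem.Set.empty) k = l.any t := by
  rw [Bool.eq_iff_iff, PySem.Set.contains_iff,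
    pv_go_mem l PySem.Set.empty (by simp [PySem.Set.empty]) (by simp [PySem.Set.empty]) k,
    List.any_eq_true]
  simp [PySem.Set.empty, hk]

-- ===== VERDICT (by name: the statement is the Claim_ definition above) =====
theorem collect_needed_controllers_py_spec : Claim_equal_collect_needed_controllers_py := by
  intro edittexts _
  show collect_needed_controllers_py edittexts = collect_needed_controllers_py_alt edittexts
  unfold collect_needed_controllers_py collect_needed_controllers_py_alt
  rw [pv_fold_eq, pv_out,
    pv_needed_test _ _ pvAU (fun et => by rw [pv_mem_contrib]; simp),
    pv_needed_test _ _ pvAP (fun et => by rw [pv_mem_contrib]; simp),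
    pv_needed_test _ _ pvAC (fun et => by rw [pv_mem_contrib]; simp)]
  cases edittexts.any pvAU <;> cases edittexts.any pvAP <;> cases edittexts.any pvAC <;> simp
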